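-- pv_equiv track=rewrite | github.com/Jjenny-K/coding-test-practice | programmers/p_lv_01/python/예산.py | solution_002
-- ===== SOURCE A (Python) =====
-- def solution_002(d, budget):
--     answer = 0
--
--     for i in sorted(d):
--         if budget < 0:
--             break
--         budget -= i
--         answer += 1
--
--     return answer
-- ===== SOURCE B (Python) =====
-- def solution_002(d, budget):
--     s = sorted(d)
--     # exclusive prefix sums: prefixes[j] = sum of the j smallest items
--     prefixes = []
--     total = 0
--     for x in s:
--         prefixes.append(total)
--         total += x
--     # answer = index of the first prefix exceeding the budget, else all items
--     for j, p in enumerate(prefixes):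
--         if p > budget:
--             return j
--     return len(s)
-- ===== Notes on version B (the rewrite author's own statement) =====
-- stated objective: alternative
-- what changed: Replaces A's stop-when-negative greedy subtraction loop with a precomputed table of exclusive prefix sums of the sorted list, returning the index of the first prefix that exceeds the budget.
import Mathlib
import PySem

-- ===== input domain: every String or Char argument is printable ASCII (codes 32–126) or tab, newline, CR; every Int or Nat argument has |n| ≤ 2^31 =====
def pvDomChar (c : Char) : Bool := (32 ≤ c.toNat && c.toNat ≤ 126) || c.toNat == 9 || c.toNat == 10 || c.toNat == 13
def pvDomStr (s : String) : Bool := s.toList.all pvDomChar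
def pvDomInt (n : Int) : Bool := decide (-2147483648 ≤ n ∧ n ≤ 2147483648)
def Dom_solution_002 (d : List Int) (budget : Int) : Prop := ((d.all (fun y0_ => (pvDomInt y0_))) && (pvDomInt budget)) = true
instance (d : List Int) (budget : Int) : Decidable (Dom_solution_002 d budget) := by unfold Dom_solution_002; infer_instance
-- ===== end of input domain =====

-- B recomputes A's greedy scan as a table of exclusive prefix sums of the sorted
-- list followed by a search for the first prefix exceeding the budget (alternative
-- decomposition, same cost).

-- ===== PORT A =====
-- A's for-loop over sorted(d) with break, state (answer, budget)
def aLoop : List Int → Int → Int → Int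
  | [], answer, _ => answer
  | i :: rest, answer, budget =>
    if budget < 0 then answer else aLoop rest (answer + 1) (budget - i)

def solution_002 (d : List Int) (budget : Int) : Int :=
  aLoop (PySem.List.sorted d (fun x => x) false) 0 budget

-- ===== PORT B =====
-- Source B's first loop: state (prefixes, total), append total then add x
def bPrefixes (s : List Int) : List Int :=
  (s.foldl (fun (acc : List Int × Int) x => (acc.1 ++ [acc.2], acc.2 + x)) (([] : List Int), (0 : Int))).1

-- Source B's second loop: enumerate prefixes, return j at first p > budget, else n
def bFind (budget : Int) (n : Int) : List Int → Int → Int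
  | [], _ => n
  | p :: rest, j => if p > budget then j else bFind budget n rest (j + 1)

def solution_002_alt (d : List Int) (budget : Int) : Int :=
  let s := PySem.List.sorted d (fun x => x) false
  bFind budget (s.length : Int) (bPrefixes s) 0

-- ===== PRECONDITION & SPEC =====
def Spec_solution_002 (d : List Int) (budget : Int) (out : Int) : Prop := out = solution_002_alt d budget
instance (d : List Int) (budget : Int) (out : Int) : Decidable (Spec_solution_002 d budget out) := by unfold Spec_solution_002; infer_instance

-- ===== CLAIM (what is proved, stated in full; the proofs are below) =====
def Claim_equal_solution_002 : Prop := ∀ (d : List Int) (budget : Int), Dom_solution_002 d budget → Spec_solution_002 d budget (solution_002 d budget)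

-- ===== LEMMAS AND PROOFS =====

-- structural form of Source B's prefix-building loop
def prefAux : List Int → Int → List Int
  | [], _ => []
  | x :: rest, t => t :: prefAux rest (t + x)

theorem bPrefixes_foldl (s : List Int) :
    ∀ (acc : List Int) (t : Int),
      (s.foldl (fun (acc : List Int × Int) x => (acc.1 ++ [acc.2], acc.2 + x)) (acc, t)).1
        = acc ++ prefAux s t := by
  induction s with
  | nil => intro acc t; simp [prefAux]
  | cons x rest ih =>
      intro acc t
      simp [List.foldl, prefAux, ih (acc ++ [t]) (t + x)]

theorem find_eq_aLoop (s : List Int) :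
    ∀ (budget t j : Int),
      bFind budget (j + (s.length : Int)) (prefAux s t) j = aLoop s j (budget - t) := by
  induction s with
  | nil => intro budget t j; simp [prefAux, bFind, aLoop]
  | cons x rest ih =>
      intro budget t j
      simp only [prefAux, bFind, aLoop, List.length_cons]
      have h : (j + ((rest.length : Int) + 1)) = (j + 1) + (rest.length : Int) := by ring
      by_cases hb : budget - t < 0
      · have : t > budget := by omega
        simp [this, hb]
      · have : ¬ t > budget := by omega
        push_cast
        rw [if_neg this, if_neg hb, show j + ((rest.length : Int) + 1) = (j + 1) + (rest.length : Int) by ring,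
            ih budget (t + x) (j + 1)]
        congr 1
        ring

-- ===== VERDICT (by name: the statement is the Claim_ definition above) =====
theorem solution_002_spec : Claim_equal_solution_002 := by
  intro d budget _
  unfold Spec_solution_002 solution_002 solution_002_alt
  show aLoop (PySem.List.sorted d (fun x => x) false) 0 budget
      = bFind budget ((PySem.List.sorted d (fun x => x) false).length : Int)
          (bPrefixes (PySem.List.sorted d (fun x => x) false)) 0
  rw [bPrefixes, bPrefixes_foldl _ [] 0, List.nil_append]
  have h := find_eq_aLoop (PySem.List.sorted d (fun x => x) false) budget 0 0
  simpa using h.symm
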